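-- pv_equiv track=rewrite | github.com/xremis22/univ-tln | L2/i33/I33/TP3/2023/ex2.py | sous_groupe_gen_add
-- ===== SOURCE A (Python) =====
-- def sous_groupe_gen_add(a, n):
--     L = []
--     c = 0
--     while(True):
--         c += a
--         L += [c%n]
--         if((c%n)==0):
--             break
--     return L
-- ===== SOURCE B (Python) =====
-- def _gcd(x, y):
--     while y:
--         x, y = y, x % y
--     return x
--
--
-- def sous_groupe_gen_add(a, n):
--     k = abs(n) // _gcd(abs(a), abs(n))
--     return [(i * a) % n for i in range(1, k + 1)]
-- ===== Notes on version B (the rewrite author's own statement) =====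
-- stated objective: alternative
-- what changed: B computes the output length in closed form as |n| // gcd(|a|,|n|) and generates the residues with a single comprehension, instead of A's iterate-until-a-zero-residue while-True loop.
-- outside the precondition, e.g. on sous_groupe_gen_add(3, 0): A raises ZeroDivisionError, B returns []
import Mathlib
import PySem

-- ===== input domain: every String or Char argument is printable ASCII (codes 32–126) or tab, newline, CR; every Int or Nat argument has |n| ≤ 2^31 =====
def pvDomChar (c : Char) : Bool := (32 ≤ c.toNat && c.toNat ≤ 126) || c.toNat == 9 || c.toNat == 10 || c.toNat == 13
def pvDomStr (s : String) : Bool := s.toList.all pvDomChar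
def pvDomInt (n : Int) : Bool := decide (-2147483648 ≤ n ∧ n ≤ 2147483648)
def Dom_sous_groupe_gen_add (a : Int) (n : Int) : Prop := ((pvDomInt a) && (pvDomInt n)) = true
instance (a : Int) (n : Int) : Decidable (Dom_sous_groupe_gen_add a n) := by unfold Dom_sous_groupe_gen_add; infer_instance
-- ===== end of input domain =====

-- B replaces A's iterate-until-zero-residue loop by a closed-form count |n|/gcd(|a|,|n|)
-- of elements generated directly (objective: alternative decomposition, same cost class).

-- ===== PORT A =====
-- A's 'while True' loop; it runs |n|/gcd(|a|,|n|) ≤ |n| iterations when n ≠ 0,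
-- so the fuel n.natAbs is never exhausted on Pre_ (n = 0 raises in Python, excluded by Pre_).
def pvLoopA (a n : Int) : Nat → Int → List Int → List Int
  | 0, _, L => L
  | f + 1, c, L =>
    let c' := c + a
    let L' := L ++ [PySem.Int.mod c' n]
    if PySem.Int.mod c' n = 0 then L' else pvLoopA a n f c' L'

def sous_groupe_gen_add (a : Int) (n : Int) : List Int :=
  pvLoopA a n n.natAbs 0 []

-- ===== PORT B =====
-- Source B's hand-written Euclid gcd (on absolute values, hence Nat)
def pvGcd : Nat → Nat → Nat
  | x, 0 => x
  | x, y + 1 => pvGcd (y + 1) (x % (y + 1))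
termination_by x y => y
decreasing_by exact Nat.mod_lt _ (Nat.succ_pos y)

def sous_groupe_gen_add_alt (a : Int) (n : Int) : List Int :=
  let k : Nat := n.natAbs / pvGcd a.natAbs n.natAbs
  (PySem.List.pyRange 1 ((k : Int) + 1) 1).map (fun i => PySem.Int.mod (i * a) n)

-- ===== PRECONDITION & SPEC =====
-- Pre_ excludes exactly n = 0, where Python A raises ZeroDivisionError (c % 0).
def Pre_sous_groupe_gen_add (a : Int) (n : Int) : Prop := n ≠ 0
instance (a : Int) (n : Int) : Decidable (Pre_sous_groupe_gen_add a n) := by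
  unfold Pre_sous_groupe_gen_add; infer_instance
def pvWitness_sous_groupe_gen_add : Int × Int := (4, 6)

def Spec_sous_groupe_gen_add (a : Int) (n : Int) (out : List Int) : Prop := out = sous_groupe_gen_add_alt a n
instance (a : Int) (n : Int) (out : List Int) : Decidable (Spec_sous_groupe_gen_add a n out) := by unfold Spec_sous_groupe_gen_add; infer_instance

-- ===== CLAIM (what is proved, stated in full; the proofs are below) =====
def Claim_equal_sous_groupe_gen_add : Prop := ∀ (a : Int) (n : Int), Dom_sous_groupe_gen_add a n → Pre_sous_groupe_gen_add a n → Spec_sous_groupe_gen_add a n (sous_groupe_gen_add a n)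

-- ===== LEMMAS AND PROOFS =====

-- the cycle length used by B
def pvK (a n : Int) : Nat := n.natAbs / Nat.gcd a.natAbs n.natAbs

lemma pvGcd_eq (x y : Nat) : pvGcd x y = Nat.gcd y x := by
  induction x, y using pvGcd.induct with
  | case1 x => simp [pvGcd]
  | case2 x y ih => rw [pvGcd, ih]; exact (Nat.gcd_rec _ _).symm

lemma pvDvd_iff (b m j : Nat) (hm : 0 < m) :
    m ∣ j * b ↔ (m / Nat.gcd b m) ∣ j := by
  have hg : 0 < Nat.gcd b m := Nat.gcd_pos_of_pos_right _ hm
  have hbg : Nat.gcd b m ∣ b := Nat.gcd_dvd_left _ _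
  have hmg : Nat.gcd b m ∣ m := Nat.gcd_dvd_right _ _
  set g := Nat.gcd b m with hgdef
  constructor
  · rintro ⟨t, ht⟩
    have hco : Nat.Coprime (m / g) (b / g) := (Nat.coprime_div_gcd_div_gcd hg).symm
    apply hco.dvd_of_dvd_mul_right
    refine ⟨t, ?_⟩
    have h1 : g * (j * (b / g)) = g * (m / g * t) := by
      calc g * (j * (b / g)) = j * (g * (b / g)) := by ring
        _ = j * b := by rw [Nat.mul_div_cancel' hbg]
        _ = m * t := ht
        _ = g * (m / g) * t := by rw [Nat.mul_div_cancel' hmg]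
        _ = g * (m / g * t) := by ring
    exact Nat.eq_of_mul_eq_mul_left hg h1
  · intro h
    have h1 : m ∣ j * g := by
      calc m = m / g * g := (Nat.div_mul_cancel hmg).symm
        _ ∣ j * g := Nat.mul_dvd_mul_right h g
      
    calc m ∣ j * g := h1
      _ ∣ j * b := Nat.mul_dvd_mul_left j hbg

lemma pvDvd_iff_int (a n : Int) (hn : n ≠ 0) (j : Nat) :
    n ∣ (j : Int) * a ↔ pvK a n ∣ j := by
  rw [← Int.natAbs_dvd_natAbs, Int.natAbs_mul, Int.natAbs_natCast]
  exact pvDvd_iff a.natAbs n.natAbs j (Int.natAbs_pos.mpr hn)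

lemma pvK_pos (a n : Int) (hn : n ≠ 0) : 0 < pvK a n := by
  have hm : 0 < n.natAbs := Int.natAbs_pos.mpr hn
  exact Nat.div_pos (Nat.le_of_dvd hm (Nat.gcd_dvd_right _ _)) (Nat.gcd_pos_of_pos_right _ hm)

lemma pvLoop_spec (a n : Int) (hn : n ≠ 0) :
    ∀ (f i : Nat) (acc : List Int), i < pvK a n → pvK a n - i ≤ f →
    pvLoopA a n f ((i : Int) * a) acc =
      acc ++ (PySem.List.pyRange ((i : Int) + 1) ((pvK a n : Int) + 1) 1).map
        (fun j => PySem.Int.mod (j * a) n) := by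
  intro f
  induction f with
  | zero => intro i acc hi hf; omega
  | succ f ih =>
    intro i acc hi hf
    have hc : (i : Int) * a + a = ((i + 1 : Nat) : Int) * a := by push_cast; ring
    rw [pvLoopA]
    simp only [hc]
    by_cases hk : i + 1 = pvK a n
    · have hdvd : n ∣ ((i + 1 : Nat) : Int) * a := (pvDvd_iff_int a n hn _).mpr (hk ▸ dvd_refl _)
      have hz : PySem.Int.mod (((i + 1 : Nat) : Int) * a) n = 0 :=
        (PySem.Int.mod_eq_zero_iff_dvd _ _).mpr hdvd
      rw [if_pos hz]
      have hr : PySem.List.pyRange ((i : Int) + 1) ((pvK a n : Int) + 1) 1 = [(i : Int) + 1] := by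
        have : ((pvK a n : Int)) = (i : Int) + 1 := by omega
        rw [this]; exact PySem.List.pyRange_one_singleton _
      rw [hr]
      simp only [List.map_cons, List.map_nil, hz]
      have : ((i : Int) + 1) * a = (((i + 1 : Nat) : Int)) * a := by push_cast; ring
      rw [this, hz]
    · have hlt : i + 1 < pvK a n := by omega
      have hnd : ¬ n ∣ ((i + 1 : Nat) : Int) * a := by
        rw [pvDvd_iff_int a n hn]
        intro hd
        have := Nat.le_of_dvd (by omega) hd
        omega
      have hz : PySem.Int.mod (((i + 1 : Nat) : Int) * a) n ≠ 0 := by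
        intro h; exact hnd ((PySem.Int.mod_eq_zero_iff_dvd _ _).mp h)
      rw [if_neg hz]
      rw [ih (i + 1) _ hlt (by omega)]
      have hr : PySem.List.pyRange ((i : Int) + 1) ((pvK a n : Int) + 1) 1
          = ((i : Int) + 1) :: PySem.List.pyRange ((i : Int) + 1 + 1) ((pvK a n : Int) + 1) 1 := by
        exact PySem.List.pyRange_one_cons (by omega)
      rw [hr]
      simp only [List.map_cons]
      have h2 : (((i + 1 : Nat) : Int)) = (i : Int) + 1 := by push_cast; ring
      rw [h2]
      simp

-- ===== VERDICT (by name: the statement is the Claim_ definition above) =====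
theorem sous_groupe_gen_add_spec : Claim_equal_sous_groupe_gen_add := by
  intro a n _ hn
  unfold Spec_sous_groupe_gen_add sous_groupe_gen_add sous_groupe_gen_add_alt
  have h := pvLoop_spec a n hn n.natAbs 0 [] (pvK_pos a n hn)
    (by simpa [pvK] using Nat.div_le_self n.natAbs (Nat.gcd a.natAbs n.natAbs))
  simp only [Nat.cast_zero, zero_mul] at h
  rw [h]
  simp [pvGcd_eq, pvK, Nat.gcd_comm]
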